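-- pv_equiv track=rewrite | github.com/artur-hatch/AOIS | Lab_01/run.py | binary_multiply
-- ===== SOURCE A (Python) =====
-- def decimal_to_binary(num, bits=8):
--     if num >= 0:
--         binary = bin(num)[2:].zfill(bits)  # Прямой код для положительного числа
--         direct_code = binary
--         reverse_code = binary
--         complement_code = binary
--     else:
--         binary = bin(abs(num))[2:].zfill(bits)
--         direct_code = '1' + binary[1:]
--         reverse_code = ''.join('1' if i == '0' else '0' for i in binary)
--         bit = '0' * (bits - 1) + '1'
--         max_len = max(len(reverse_code), len(bit))
--         rev_code = reverse_code.zfill(max_len)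
--         bit = bit.zfill(max_len)
--         result = ''
--         carry = 0
--         for i in range(max_len - 1, -1, -1):
--             r = carry
--             r += 1 if rev_code[i] == '1' else 0
--             r += 1 if bit[i] == '1' else 0
--             result = ('1' if r % 2 == 1 else '0') + result
--             carry = 1 if r >= 2 else 0
--         if carry != 0:
--             result = '1' + result
--         complement_code = result[-max_len:]
--     return list(direct_code), list(reverse_code), list(complement_code)
--
-- def binary_multiply(first_num, sec_num, bits=8):
--     sign_a = 0 if first_num >= 0 else 1
--     sign_b = 0 if sec_num >= 0 else 1
--     sign_res = sign_a ^ sign_b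
--     a_abs = abs(first_num)
--     b_abs = abs(sec_num)
--
--     result = 0
--     for i in range(bits):
--         if (b_abs >> i) & 1:
--             result += a_abs << i
--
--     bin_res =''.join(decimal_to_binary(result)[0])
--     binary_number = bin_res.lstrip('0') or '0'
--     res_bin = str(sign_res)+ ' ' + binary_number
--     result = "-" + str(result) if sign_res == 1 else str(result)
--     return res_bin, result
-- ===== SOURCE B (Python) =====
-- def binary_multiply(first_num, sec_num, bits=8):
--     sign_res = 1 if (first_num < 0) != (sec_num < 0) else 0
--     mask = (1 << bits) - 1 if bits > 0 else 0
--     prod = abs(first_num) * (abs(sec_num) & mask)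
--     res_bin = f"{sign_res} {prod:b}"
--     dec = f"-{prod}" if sign_res else str(prod)
--     return res_bin, dec
-- ===== Notes on version B (the rewrite author's own statement) =====
-- stated objective: faster
-- what changed: Replaces the bit-by-bit shift-add loop by the closed-form product abs(a) * (abs(b) & ((1<<bits)-1)) and drops the decimal_to_binary zfill/lstrip round-trip in favour of direct binary formatting.
import Mathlib
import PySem

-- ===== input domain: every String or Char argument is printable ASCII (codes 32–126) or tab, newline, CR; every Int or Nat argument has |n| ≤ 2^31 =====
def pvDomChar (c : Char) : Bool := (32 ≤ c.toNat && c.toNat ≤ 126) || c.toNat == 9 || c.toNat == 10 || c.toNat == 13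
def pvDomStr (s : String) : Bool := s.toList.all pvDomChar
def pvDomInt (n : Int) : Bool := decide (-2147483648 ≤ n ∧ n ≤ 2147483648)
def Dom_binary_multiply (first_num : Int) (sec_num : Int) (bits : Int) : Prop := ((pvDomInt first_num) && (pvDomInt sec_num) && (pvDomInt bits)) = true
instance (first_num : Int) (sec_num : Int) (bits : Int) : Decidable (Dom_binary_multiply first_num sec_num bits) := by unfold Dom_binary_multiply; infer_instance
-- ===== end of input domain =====

-- B replaces A's shift-add loop by the masked closed-form product and formats the
-- binary string directly instead of via the zfill-then-lstrip round-trip (simpler).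

-- ===== PORT A =====

-- bin(n)[2:] for n > 0, most significant bit first (aux of pyBin)
def pvBinAux : Nat → List Char
  | 0 => []
  | n + 1 => pvBinAux ((n + 1) / 2) ++ [if (n + 1) % 2 = 1 then '1' else '0']
decreasing_by exact Nat.div_lt_self (Nat.succ_pos n) (by norm_num)

-- bin(n)[2:] for n ≥ 0 (Python: bin(0) = '0b0')
def pvBin (n : Nat) : List Char := if n = 0 then ['0'] else pvBinAux n

-- s.zfill(k) on char lists (only reached with nonnegative k here)
def pvZfill (k : Nat) (s : List Char) : List Char := List.replicate (k - s.length) '0' ++ s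

-- port of decimal_to_binary (returns char lists; Python returns lists of 1-char strings,
-- which binary_multiply immediately ''.join's, so char lists are the faithful carrier)
def decimal_to_binary_port (num : Int) (bits : Int) : List Char × List Char × List Char :=
  if num ≥ 0 then
    let binary := pvZfill bits.toNat (pvBin num.toNat)
    (binary, binary, binary)
  else
    let binary := pvZfill bits.toNat (pvBin num.natAbs)
    let direct_code := '1' :: binary.drop 1
    let reverse_code := binary.map (fun c => if c = '0' then '1' else '0')
    let bit0 := List.replicate (bits - 1).toNat '0' ++ ['1']
    let max_len := max reverse_code.length bit0.length
    let rev_code := pvZfill max_len reverse_code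
    let bit := pvZfill max_len bit0
    -- for i in range(max_len-1, -1, -1): ripple-carry add of rev_code and bit
    let rc := (PySem.List.pyRange (max_len - 1) (-1) (-1)).foldl
      (fun (st : List Char × Nat) i =>
        let r := st.2 + (if rev_code.getD i.toNat ' ' = '1' then 1 else 0)
                      + (if bit.getD i.toNat ' ' = '1' then 1 else 0)
        ((if r % 2 = 1 then '1' else '0') :: st.1, if r ≥ 2 then 1 else 0))
      ([], 0)
    let result := if rc.2 ≠ 0 then '1' :: rc.1 else rc.1
    let complement_code := result.drop (result.length - max_len)  -- result[-max_len:], max_len ≥ 1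
    (direct_code, reverse_code, complement_code)

def binary_multiply (first_num : Int) (sec_num : Int) (bits : Int) : String × String :=
  let sign_a : Nat := if first_num ≥ 0 then 0 else 1
  let sign_b : Nat := if sec_num ≥ 0 then 0 else 1
  let sign_res := sign_a ^^^ sign_b
  let a_abs := first_num.natAbs
  let b_abs := sec_num.natAbs
  -- for i in range(bits): if (b_abs >> i) & 1: result += a_abs << i   (values all nonnegative)
  let result := (PySem.List.pyRange 0 bits 1).foldl
    (fun (acc : Nat) i => if (b_abs >>> i.toNat) &&& 1 = 1 then acc + (a_abs <<< i.toNat) else acc) 0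
  let bin_res := (decimal_to_binary_port (result : Int) 8).1
  let stripped := bin_res.dropWhile (· = '0')
  let binary_number := if stripped = [] then ['0'] else stripped  -- .lstrip('0') or '0'
  let res_bin := PySem.Int.toStr (sign_res : Int) ++ " " ++ String.mk binary_number
  let result_str := if sign_res = 1 then "-" ++ PySem.Int.toStr (result : Int) else PySem.Int.toStr (result : Int)
  (res_bin, result_str)

-- ===== PORT B =====
def binary_multiply_alt (first_num : Int) (sec_num : Int) (bits : Int) : String × String :=
  let sign_res : Nat := if (decide (first_num < 0)) ≠ (decide (sec_num < 0)) then 1 else 0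
  let mask : Nat := if bits > 0 then 2 ^ bits.toNat - 1 else 0
  let prod := first_num.natAbs * (sec_num.natAbs &&& mask)
  let res_bin := PySem.Int.toStr (sign_res : Int) ++ " " ++ String.mk (pvBin prod)
  let dec := if sign_res ≠ 0 then "-" ++ PySem.Int.toStr (prod : Int) else PySem.Int.toStr (prod : Int)
  (res_bin, dec)

-- ===== PRECONDITION & SPEC =====
def Spec_binary_multiply (first_num : Int) (sec_num : Int) (bits : Int) (out : String × String) : Prop := out = binary_multiply_alt first_num sec_num bits
instance (first_num : Int) (sec_num : Int) (bits : Int) (out : String × String) : Decidable (Spec_binary_multiply first_num sec_num bits out) := by unfold Spec_binary_multiply; infer_instance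

-- ===== CLAIM (what is proved, stated in full; the proofs are below) =====
def Claim_equal_binary_multiply : Prop := ∀ (first_num : Int) (sec_num : Int) (bits : Int), Dom_binary_multiply first_num sec_num bits → Spec_binary_multiply first_num sec_num bits (binary_multiply first_num sec_num bits)

-- ===== LEMMAS AND PROOFS =====

-- A's loop over range(n) computes a * (b mod 2^n)
theorem pv_loop_eq (a b : Nat) : ∀ (n : Nat),
    (PySem.List.pyRange 0 (n : Int) 1).foldl
      (fun (acc : Nat) i => if (b >>> i.toNat) &&& 1 = 1 then acc + (a <<< i.toNat) else acc) 0
    = a * (b % 2 ^ n) := by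
  intro n
  induction n with
  | zero => simp [Nat.mod_one]
  | succ n ih =>
      rw [show ((n + 1 : Nat) : Int) = (n : Int) + 1 by push_cast; ring,
        PySem.List.pyRange_one_succ_right (by positivity), List.foldl_append, ih]
      have hb : (b >>> n) &&& 1 = b / 2 ^ n % 2 := by
        rw [Nat.shiftRight_eq_div_pow, Nat.and_one_is_mod]
      have hm : b % 2 ^ (n + 1) = b % 2 ^ n + 2 ^ n * (b / 2 ^ n % 2) := Nat.mod_pow_succ
      simp only [List.foldl_cons, List.foldl_nil, Int.toNat_natCast, hb, hm]
      rcases Nat.mod_two_eq_zero_or_one (b / 2 ^ n) with h | h <;>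
        simp [h, Nat.shiftLeft_eq, Nat.mul_add] <;> ring

-- pvBinAux of a positive number starts with '1'
theorem pvBinAux_head : ∀ (n : Nat), 0 < n → ∃ l, pvBinAux n = '1' :: l := by
  intro n
  induction n using Nat.strong_induction_on with
  | _ n ih =>
    intro hn
    match n, hn with
    | n + 1, _ =>
      rw [pvBinAux]
      rcases Nat.eq_zero_or_pos ((n + 1) / 2) with h | h
      · have h1 : n + 1 = 1 := by omega
        simp [h, h1, pvBinAux]
      · obtain ⟨l, hl⟩ := ih ((n + 1) / 2) (Nat.div_lt_self (Nat.succ_pos n) (by norm_num)) h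
        exact ⟨l ++ [if (n + 1) % 2 = 1 then '1' else '0'], by rw [hl]; simp⟩

-- stripping leading zeros from a zero-padded pvBin gives back pvBin (with the 'or 0' fallback)
theorem pv_strip_pad (k n : Nat) :
    (let s := (List.replicate k '0' ++ pvBin n).dropWhile (· = '0');
     if s = [] then ['0'] else s) = pvBin n := by
  have hrep : ∀ (m : Nat) (t : List Char),
      (List.replicate m '0' ++ t).dropWhile (· = '0') = t.dropWhile (· = '0') := by
    intro m t
    induction m with
    | zero => simp
    | succ m ih => simpa [List.replicate_succ, List.dropWhile] using ih
  rcases Nat.eq_zero_or_pos n with h | h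
  · simp [h, pvBin, hrep, List.dropWhile]
  · obtain ⟨l, hl⟩ := pvBinAux_head n h
    have hb : pvBin n = '1' :: l := by rw [pvBin, if_neg (by omega)]; exact hl
    simp [hrep, hb, List.dropWhile]

-- A's formatting pipeline (decimal_to_binary, lstrip('0') or '0') on a nonnegative value is just pvBin
theorem pv_fmt (r : Nat) :
    (if ((decimal_to_binary_port (r : Int) 8).1).dropWhile (· = '0') = [] then ['0']
     else ((decimal_to_binary_port (r : Int) 8).1).dropWhile (· = '0')) = pvBin r := by
  have h : (decimal_to_binary_port (r : Int) 8).1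
      = List.replicate (8 - (pvBin r).length) '0' ++ pvBin r := by
    simp [decimal_to_binary_port, pvZfill]
  rw [h]
  exact pv_strip_pad _ r

-- the two sign computations agree
theorem pv_sign (f s : Int) :
    ((if f ≥ 0 then (0 : Nat) else 1) ^^^ (if s ≥ 0 then (0 : Nat) else 1))
      = (if (decide (f < 0)) ≠ (decide (s < 0)) then (1 : Nat) else 0) := by
  rcases lt_or_ge f 0 with hf | hf <;> rcases lt_or_ge s 0 with hs | hs <;>
    simp [hf, hs, not_le_of_gt, not_lt_of_ge]

-- the loop result equals the masked product
theorem pv_prod (a b : Nat) (bits : Int) :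
    (PySem.List.pyRange 0 bits 1).foldl
      (fun (acc : Nat) i => if (b >>> i.toNat) &&& 1 = 1 then acc + (a <<< i.toNat) else acc) 0
    = a * (b &&& (if bits > 0 then 2 ^ bits.toNat - 1 else 0)) := by
  rcases le_or_gt bits 0 with h | h
  · rw [PySem.List.pyRange_one_eq_nil h]
    simp [not_lt_of_ge h]
  · rw [if_pos h, show bits = (bits.toNat : Int) by omega, pv_loop_eq,
      Nat.and_two_pow_sub_one_eq_mod, Int.toNat_natCast]

-- ===== VERDICT (by name: the statement is the Claim_ definition above) =====
theorem binary_multiply_spec : Claim_equal_binary_multiply := by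
  intro f s bits _
  unfold Spec_binary_multiply binary_multiply binary_multiply_alt
  simp only [pv_sign f s, pv_prod f.natAbs s.natAbs bits, pv_fmt]
  split <;> simp
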